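-- pv_equiv track=rewrite | github.com/RvMerle/advent_of_code | 2025/day06/code.py | part2
-- ===== SOURCE A (Python) =====
-- from math import prod
--
-- def part2(lines: list[str]) -> list[int]:
--     res = []
--
--     operator = lines[-1][0]
--     nums = []
--     for i in range(len(lines[0])):
--         num = "".join(line[i] for line in lines[:-1]).strip()
--
--         if num:
--             nums.append(int(num))
--         if (not num) or (i == len(lines[0]) - 1):
--             if operator == "+":
--                 res.append(sum(nums))
--             else:
--                 res.append(prod(nums))
--             nums.clear()
--
--             if i != len(lines[0]) - 1:
--                 operator = lines[-1][i + 1]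
--     return res
-- ===== SOURCE B (Python) =====
-- from math import prod
--
-- def part2(lines: list[str]) -> list[int]:
--     width = len(lines[0])
--     cols = ["".join(line[i] for line in lines[:-1]).strip() for i in range(width)]
--     # split the columns into operator segments at blank columns; a segment's
--     # operator sits in the last line at the segment's start index
--     segments = []
--     start = 0
--     for i, c in enumerate(cols):
--         if not c:
--             segments.append((start, cols[start:i]))
--             start = i + 1
--     if start < width:
--         segments.append((start, cols[start:width]))
--     return [sum(int(v) for v in vals) if lines[-1][s] == "+" else prod(int(v) for v in vals)
--             for s, vals in segments]
-- ===== Notes on version B (the rewrite author's own statement) =====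
-- stated objective: simpler
-- what changed: A's single stateful loop (threaded operator variable, mutable nums accumulator, flush-on-blank-or-last emission) is replaced by a decomposition: build the column strings once, split them into segments at blank columns, then evaluate each segment reading its operator directly from the last line at the segment's start index.
import Mathlib
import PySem

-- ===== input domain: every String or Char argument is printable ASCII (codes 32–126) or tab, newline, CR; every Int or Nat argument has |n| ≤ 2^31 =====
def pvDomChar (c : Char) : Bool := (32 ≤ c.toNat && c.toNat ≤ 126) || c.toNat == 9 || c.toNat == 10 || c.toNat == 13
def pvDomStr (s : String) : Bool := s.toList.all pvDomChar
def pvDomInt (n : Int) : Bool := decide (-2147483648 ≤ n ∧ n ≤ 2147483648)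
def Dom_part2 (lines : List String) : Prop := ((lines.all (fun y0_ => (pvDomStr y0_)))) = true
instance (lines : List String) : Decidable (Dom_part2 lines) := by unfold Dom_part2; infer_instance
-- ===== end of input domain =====

-- B replaces A's stateful flush loop (threaded operator, mutable nums, in-loop emission) by a
-- decomposition: build the column strings once, split them into segments at blank columns, and
-- evaluate each segment with the operator read directly at the segment's start index (objective: simpler).

-- ===== PORT A =====
-- shared column extraction: "".join(line[i] for line in lines[:-1]).strip(), at char level
def colChars (lines : List String) (i : Int) : List Char :=
  PySem.Chars.strip ((PySem.List.slice lines none (some (-1))).map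
    (fun line => PySem.List.pyGetD line.toList i ' '))

-- one iteration of A's for-loop; state = (res, operator, nums)
def stepA (lines : List String) (n : Int) (st : List Int × Char × List Int) (i : Int) :
    List Int × Char × List Int :=
  let num := colChars lines i
  let nums := if num ≠ [] then st.2.2 ++ [(PySem.Int.ofChars? num).getD 0] else st.2.2
  if num = [] ∨ i = n - 1 then
    (st.1 ++ [if st.2.1 = '+' then nums.sum else nums.prod],
     if i ≠ n - 1 then PySem.List.pyGetD (PySem.List.pyGetD lines (-1) "").toList (i + 1) ' '
     else st.2.1,
     [])
  else (st.1, st.2.1, nums)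

def part2 (lines : List String) : List Int :=
  let n : Int := PySem.Str.len (PySem.List.pyGetD lines 0 "")
  let op0 : Char := PySem.List.pyGetD (PySem.List.pyGetD lines (-1) "").toList 0 ' '
  ((PySem.List.pyRange 0 n 1).foldl (stepA lines n) ([], op0, [])).1

-- ===== PORT B =====
-- one iteration of B's segment-splitting loop; state = (segments, start)
def stepB (cols : List (List Char)) (st : List (Int × List (List Char)) × Int)
    (ic : Int × List Char) : List (Int × List (List Char)) × Int :=
  if ic.2 = [] then (st.1 ++ [(st.2, PySem.List.slice cols (some st.2) (some ic.1))], ic.1 + 1)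
  else st

def part2_alt (lines : List String) : List Int :=
  let width : Int := PySem.Str.len (PySem.List.pyGetD lines 0 "")
  let cols : List (List Char) := (PySem.List.pyRange 0 width 1).map (colChars lines)
  let p := (PySem.List.enumerate cols).foldl (stepB cols) ([], 0)
  let segs := if p.2 < width then p.1 ++ [(p.2, PySem.List.slice cols (some p.2) (some width))] else p.1
  segs.map (fun sv =>
    if PySem.List.pyGetD (PySem.List.pyGetD lines (-1) "").toList sv.1 ' ' = '+'
    then (sv.2.map (fun v => (PySem.Int.ofChars? v).getD 0)).sum
    else (sv.2.map (fun v => (PySem.Int.ofChars? v).getD 0)).prod)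

-- ===== PRECONDITION & SPEC =====
-- Exactly where Python A returns: lines nonempty, the last line nonempty, every other line at
-- least as long as lines[0] (else IndexError), every nonblank column parses as int (else
-- ValueError), and after every non-final blank column the last line has an operator character
-- at the next index (else IndexError).
def Pre_part2 (lines : List String) : Prop :=
  lines ≠ [] ∧
  1 ≤ (PySem.List.pyGetD lines (-1) "").toList.length ∧
  (∀ l ∈ lines.dropLast, (lines.headD "").toList.length ≤ l.toList.length) ∧
  (∀ i ∈ List.range (lines.headD "").toList.length,
      colChars lines (i : Int) = [] ∨ (PySem.Int.ofChars? (colChars lines (i : Int))).isSome) ∧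
  (∀ i ∈ List.range (lines.headD "").toList.length,
      colChars lines (i : Int) = [] → i + 1 < (lines.headD "").toList.length →
      i + 1 < (PySem.List.pyGetD lines (-1) "").toList.length)
instance (lines : List String) : Decidable (Pre_part2 lines) := by unfold Pre_part2; infer_instance

def pvWitness_part2 : List String := ["1 2", "3 4", "+ *"]

def Spec_part2 (lines : List String) (out : List Int) : Prop := out = part2_alt lines
instance (lines : List String) (out : List Int) : Decidable (Spec_part2 lines out) := by unfold Spec_part2; infer_instance

-- ===== CLAIM (what is proved, stated in full; the proofs are below) =====
def Claim_equal_part2 : Prop := ∀ (lines : List String), Dom_part2 lines → Pre_part2 lines → Spec_part2 lines (part2 lines)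

-- ===== LEMMAS AND PROOFS =====

-- proof-only abbreviations
def pvN (lines : List String) : Int := PySem.Str.len (PySem.List.pyGetD lines 0 "")
def pvOpAt (lines : List String) (s : Int) : Char :=
  PySem.List.pyGetD (PySem.List.pyGetD lines (-1) "").toList s ' '
def pvIntval (v : List Char) : Int := (PySem.Int.ofChars? v).getD 0
def pvEval (op : Char) (xs : List Int) : Int := if op = '+' then xs.sum else xs.prod
def pvSeg (lines : List String) (s e : Int) : List Int :=
  (PySem.List.pyRange s e 1).map (fun i => pvIntval (colChars lines i))

-- common reference: the segment values emitted while scanning the remaining columns,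
-- `j` the index of the first remaining column, `start` the current segment's start index
def pvGo (lines : List String) (j start : Int) : List (List Char) → List Int
  | [] => if start < pvN lines then [pvEval (pvOpAt lines start) (pvSeg lines start (pvN lines))] else []
  | c :: rest =>
      if c = [] then pvEval (pvOpAt lines start) (pvSeg lines start j) :: pvGo lines (j + 1) (j + 1) rest
      else pvGo lines (j + 1) start rest

def pvCols (lines : List String) : List (List Char) :=
  (PySem.List.pyRange 0 (pvN lines) 1).map (colChars lines)

def pvRender (lines : List String) (segs : List (Int × List (List Char))) : List Int :=
  segs.map (fun sv =>
    if PySem.List.pyGetD (PySem.List.pyGetD lines (-1) "").toList sv.1 ' ' = '+'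
    then (sv.2.map (fun v => (PySem.Int.ofChars? v).getD 0)).sum
    else (sv.2.map (fun v => (PySem.Int.ofChars? v).getD 0)).prod)

lemma pvSeg_refl (lines : List String) (s : Int) : pvSeg lines s s = [] := by
  simp [pvSeg, PySem.List.pyRange_one_eq_nil le_rfl]

lemma pvSeg_succ (lines : List String) (s j : Int) (h : s ≤ j) :
    pvSeg lines s (j + 1) = pvSeg lines s j ++ [pvIntval (colChars lines j)] := by
  unfold pvSeg
  rw [PySem.List.pyRange_one_succ_right h, List.map_append]
  simp

lemma pvSlice (lines : List String) (s e : Int) (h0 : 0 ≤ s) (hse : s ≤ e) (hen : e ≤ pvN lines) :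
    PySem.List.slice (pvCols lines) (some s) (some e) = (PySem.List.pyRange s e 1).map (colChars lines) := by
  have h0e : 0 ≤ e := le_trans h0 hse
  rw [PySem.List.slice_toNat _ h0 h0e]
  unfold pvCols
  rw [PySem.List.pyRange_one_append 0 s (pvN lines) h0 (le_trans hse hen)]
  rw [List.map_append, List.drop_left' (by simp [PySem.List.length_pyRange_one]; try omega)]
  rw [PySem.List.pyRange_one_append s e (pvN lines) hse hen]
  rw [List.map_append, List.take_left' (by simp [PySem.List.length_pyRange_one]; try omega)]

lemma pvRender_append (lines : List String) (a b : List (Int × List (List Char))) :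
    pvRender lines (a ++ b) = pvRender lines a ++ pvRender lines b := by
  simp [pvRender]

lemma pvRender_one (lines : List String) (s e : Int) (h0 : 0 ≤ s) (hse : s ≤ e) (hen : e ≤ pvN lines) :
    pvRender lines [(s, PySem.List.slice (pvCols lines) (some s) (some e))]
      = [pvEval (pvOpAt lines s) (pvSeg lines s e)] := by
  simp [pvRender, pvSlice lines s e h0 hse hen, pvEval, pvOpAt, pvSeg, pvIntval,
    List.map_map, Function.comp_def]

-- a nonempty remaining-column list means the current index is still below the width
lemma pvLt (lines : List String) (j : Int) (c : List Char) (rest : List (List Char))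
    (h : c :: rest = (PySem.List.pyRange j (pvN lines) 1).map (colChars lines)) : j < pvN lines := by
  by_contra hn
  rw [PySem.List.pyRange_one_eq_nil (by omega)] at h
  simp at h

-- A's loop over the remaining indices, started in a coherent state, emits pvGo
lemma pvAside (lines : List String) : ∀ (rest : List (List Char)) (j start : Int) (res : List Int),
    rest = (PySem.List.pyRange j (pvN lines) 1).map (colChars lines) → start ≤ j →
    (pvN lines ≤ j → pvN lines ≤ start) →
    ((PySem.List.pyRange j (pvN lines) 1).foldl (stepA lines (pvN lines))
        (res, pvOpAt lines start, pvSeg lines start j)).1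
      = res ++ pvGo lines j start rest := by
  intro rest
  induction rest with
  | nil =>
      intro j start res hrest hsj hns
      have hnj : pvN lines ≤ j := by
        by_contra hn
        rw [PySem.List.pyRange_one_cons (by omega)] at hrest
        simp at hrest
      rw [PySem.List.pyRange_one_eq_nil hnj]
      simp [pvGo, if_neg (by omega : ¬ start < pvN lines)]
  | cons c rest ih =>
      intro j start res hrest hsj hns
      have hjn : j < pvN lines := pvLt lines j c rest hrest
      rw [PySem.List.pyRange_one_cons hjn] at hrest ⊢
      rw [List.map_cons] at hrest
      injection hrest with hc hrest'
      subst hc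
      rw [List.foldl_cons]
      by_cases hblank : colChars lines j = []
      · by_cases hlast : j = pvN lines - 1
        · have hrest0 : rest = [] := by
            rw [hrest', PySem.List.pyRange_one_eq_nil (by omega)]; simp
          subst hlast
          rw [PySem.List.pyRange_one_eq_nil (by omega : pvN lines ≤ pvN lines - 1 + 1)]
          simp [stepA, hblank, hrest0, pvGo, pvEval]
        · have hstep : stepA lines (pvN lines) (res, pvOpAt lines start, pvSeg lines start j) j
              = (res ++ [pvEval (pvOpAt lines start) (pvSeg lines start j)],
                 pvOpAt lines (j + 1), []) := by
            simp [stepA, hblank, hlast, pvEval, pvOpAt]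
          have hih := ih (j + 1) (j + 1)
            (res ++ [pvEval (pvOpAt lines start) (pvSeg lines start j)]) hrest' le_rfl
            (by intro h; omega)
          rw [pvSeg_refl] at hih
          rw [hstep, hih]
          simp [pvGo, hblank, List.append_assoc]
      · by_cases hlast : j = pvN lines - 1
        · have hrest0 : rest = [] := by
            rw [hrest', PySem.List.pyRange_one_eq_nil (by omega)]; simp
          have hseg : pvSeg lines start j ++ [pvIntval (colChars lines j)] = pvSeg lines start (j + 1) :=
            (pvSeg_succ lines start j hsj).symm
          subst hlast
          rw [PySem.List.pyRange_one_eq_nil (by omega : pvN lines ≤ pvN lines - 1 + 1)]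
          rw [show (pvN lines - 1 + 1 : Int) = pvN lines from by omega] at hseg
          simp only [List.foldl_nil]
          rw [show stepA lines (pvN lines)
                (res, pvOpAt lines start, pvSeg lines start (pvN lines - 1)) (pvN lines - 1)
              = (res ++ [pvEval (pvOpAt lines start) (pvSeg lines start (pvN lines))],
                 pvOpAt lines start, []) from by
            simp [stepA, hblank, pvEval, pvIntval, ← hseg]]
          simp [pvGo, hblank, hrest0,
            if_pos (show start < pvN lines by omega), pvEval]
        · have hstep : stepA lines (pvN lines) (res, pvOpAt lines start, pvSeg lines start j) j
              = (res, pvOpAt lines start, pvSeg lines start (j + 1)) := by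
            simp [stepA, hblank, hlast, pvSeg_succ lines start j hsj, pvIntval]
          rw [hstep, ih (j + 1) start _ hrest' (by omega) (by intro h; omega)]
          simp [pvGo, hblank]

-- B's segment loop over the remaining enumerated columns, rendered, emits pvGo
lemma pvBside (lines : List String) : ∀ (rest : List (List Char)) (j start : Int)
    (segs : List (Int × List (List Char))),
    rest = (PySem.List.pyRange j (pvN lines) 1).map (colChars lines) → 0 ≤ start → start ≤ j →
    (pvRender lines
      (let p := (PySem.List.enumerate rest j).foldl (stepB (pvCols lines)) (segs, start);
       if p.2 < pvN lines
       then p.1 ++ [(p.2, PySem.List.slice (pvCols lines) (some p.2) (some (pvN lines)))]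
       else p.1))
      = pvRender lines segs ++ pvGo lines j start rest := by
  intro rest
  induction rest with
  | nil =>
      intro j start segs hrest h0 hsj
      have hnj : pvN lines ≤ j := by
        by_contra hn
        rw [PySem.List.pyRange_one_cons (by omega)] at hrest
        simp at hrest
      simp only [PySem.List.enumerate_nil, List.foldl_nil]
      by_cases hs : start < pvN lines
      · rw [if_pos hs, pvRender_append,
            pvRender_one lines start (pvN lines) h0 (by omega) le_rfl]
        simp [pvGo, hs]
      · rw [if_neg hs]
        simp [pvGo, hs]
  | cons c rest ih =>
      intro j start segs hrest h0 hsj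
      have hjn : j < pvN lines := pvLt lines j c rest hrest
      rw [PySem.List.pyRange_one_cons hjn] at hrest
      rw [List.map_cons] at hrest
      injection hrest with hc hrest'
      subst hc
      rw [PySem.List.enumerate_cons, List.foldl_cons]
      by_cases hblank : colChars lines j = []
      · have hstep : stepB (pvCols lines) (segs, start) (j, colChars lines j)
            = (segs ++ [(start, PySem.List.slice (pvCols lines) (some start) (some j))], j + 1) := by
          simp [stepB, hblank]
        rw [hstep, ih (j + 1) (j + 1) _ hrest' (by omega) le_rfl]
        rw [pvRender_append, pvRender_one lines start j h0 hsj (by omega)]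
        simp [pvGo, hblank, List.append_assoc]
      · have hstep : stepB (pvCols lines) (segs, start) (j, colChars lines j) = (segs, start) := by
          simp [stepB, hblank]
        rw [hstep, ih (j + 1) start _ hrest' h0 (by omega)]
        simp [pvGo, hblank]

-- ===== VERDICT (by name: the statement is the Claim_ definition above) =====
theorem part2_spec : Claim_equal_part2 := by
  intro lines _hdom _hpre
  unfold Spec_part2
  show part2 lines = part2_alt lines
  have hA : part2 lines = pvGo lines 0 0 (pvCols lines) := by
    have := pvAside lines (pvCols lines) 0 0 [] rfl le_rfl (by intro h; omega)
    rw [pvSeg_refl] at this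
    simpa [part2, pvN, pvOpAt] using this
  have hB : part2_alt lines = pvGo lines 0 0 (pvCols lines) := by
    have := pvBside lines (pvCols lines) 0 0 [] rfl le_rfl le_rfl
    simpa [part2_alt, pvN, pvCols, pvRender] using this
  rw [hA, hB]
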